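-- pv_equiv track=rewrite | github.com/rochoa85/PepFun | pepfun.py | generate_peptide_pattern
-- ===== SOURCE A (Python) =====
-- import itertools
--
-- def generate_peptide_pattern(pattern):
--     """
--     Method to generate a peptide sequences following a pattern using only natural amino acids
--
--     Arguments:
--     pattern -- Pattern based on XX to generate the list of sequences
--
--     Return:
--     list_peptides -- List with the sequences generated
--     """
--
--     # List of natural amino acids that can be included
--     natural=["A","C","D","E","F","G","H","I","K","L","M","N","P","Q","R","S","T","V","W","Y"]
--
--     list_peptides=[]
--
--     # Combination of possible sequences following the given pattern
--     for pep in itertools.product(natural, repeat=pattern.count('X')):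
--         pep = list(pep)
--         mut_pep = []
--         for res in pattern:
--             # check if any amino acid can be included in the sequence
--             if  res != 'X': mut_pep.append(res)
--             else: mut_pep.append(pep.pop(0))
--         list_peptides.append("".join(mut_pep))
--
--     # Return the list of peptide sequences
--     return list_peptides
-- ===== SOURCE B (Python) =====
-- def generate_peptide_pattern(pattern):
--     """Left-to-right fold over the pattern: maintain the list of all prefixes
--     built so far, extending each by the fixed residue or by every natural
--     amino acid at an 'X'."""
--     natural=["A","C","D","E","F","G","H","I","K","L","M","N","P","Q","R","S","T","V","W","Y"]
--     prefixes=[""]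
--     for c in pattern:
--         if c != 'X':
--             prefixes=[p+c for p in prefixes]
--         else:
--             prefixes=[p+aa for p in prefixes for aa in natural]
--     return prefixes
-- ===== Notes on version B (the rewrite author's own statement) =====
-- stated objective: alternative
-- what changed: Replaces itertools.product plus a per-peptide substitution pass (mut_pep rebuild and pop(0) for every tuple) with a single left-to-right fold over the pattern that maintains the list of all prefixes, extending each by the fixed residue or by all 20 amino acids at an 'X'.
import Mathlib
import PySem

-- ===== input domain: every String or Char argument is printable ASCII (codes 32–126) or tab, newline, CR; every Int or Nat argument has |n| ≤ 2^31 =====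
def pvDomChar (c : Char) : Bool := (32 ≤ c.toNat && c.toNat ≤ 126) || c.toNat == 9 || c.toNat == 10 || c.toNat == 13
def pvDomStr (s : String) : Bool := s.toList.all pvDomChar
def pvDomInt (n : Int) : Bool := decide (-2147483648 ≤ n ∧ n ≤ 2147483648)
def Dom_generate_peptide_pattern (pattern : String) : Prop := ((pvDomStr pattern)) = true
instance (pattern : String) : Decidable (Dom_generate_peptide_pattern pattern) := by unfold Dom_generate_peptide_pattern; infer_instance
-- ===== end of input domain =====

-- B replaces A's itertools.product + per-peptide substitution pass by one recursive
-- left-to-right expansion of the pattern (objective: alternative decomposition).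

-- ===== PORT A =====
-- the natural amino acids (shared constant of both Pythons)
def pvNatural : List Char :=
  ['A','C','D','E','F','G','H','I','K','L','M','N','P','Q','R','S','T','V','W','Y']

-- itertools.product(natural, repeat=n): leftmost coordinate varies slowest
def pvProduct : Nat → List (List Char)
  | 0 => [[]]
  | n + 1 => pvNatural.flatMap (fun a => (pvProduct n).map (fun t => a :: t))

-- the inner 'for res in pattern' loop: copy non-X chars, pop(0) from pep at 'X'
-- (the [] branch of pop(0) is unreachable since |pep| = count of 'X')
def pvFill : List Char → List Char → List Char
  | [], _ => []
  | c :: cs, pep =>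
    if c ≠ 'X' then c :: pvFill cs pep
    else
      match pep with
      | p :: ps => p :: pvFill cs ps
      | [] => []

def generate_peptide_pattern (pattern : String) : List String :=
  (pvProduct (pattern.toList.count 'X')).map
    (fun pep => String.ofList (pvFill pattern.toList pep))

-- ===== PORT B =====
-- one fold step: extend every prefix by c, or by every natural amino acid at 'X'
def pvStep (ps : List (List Char)) (c : Char) : List (List Char) :=
  if c ≠ 'X' then ps.map (fun p => p ++ [c])
  else ps.flatMap (fun p => pvNatural.map (fun a => p ++ [a]))

def generate_peptide_pattern_alt (pattern : String) : List String :=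
  ((pattern.toList.foldl pvStep [[]]).map String.ofList)

-- ===== PRECONDITION & SPEC =====
def Spec_generate_peptide_pattern (pattern : String) (out : List String) : Prop := out = generate_peptide_pattern_alt pattern
instance (pattern : String) (out : List String) : Decidable (Spec_generate_peptide_pattern pattern out) := by unfold Spec_generate_peptide_pattern; infer_instance

-- ===== CLAIM (what is proved, stated in full; the proofs are below) =====
def Claim_equal_generate_peptide_pattern : Prop := ∀ (pattern : String), Dom_generate_peptide_pattern pattern → Spec_generate_peptide_pattern pattern (generate_peptide_pattern pattern)

-- ===== LEMMAS AND PROOFS =====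

theorem pvFold_eq (cs : List Char) : ∀ P : List (List Char),
    cs.foldl pvStep P =
      P.flatMap (fun pre => (pvProduct (cs.count 'X')).map (fun pep => pre ++ pvFill cs pep)) := by
  induction cs with
  | nil => intro P; simp [pvProduct, pvFill]
  | cons c cs ih =>
    intro P
    rw [List.foldl_cons, ih]
    by_cases h : c = 'X'
    · subst h
      simp only [pvStep, ne_eq, not_true_eq_false, if_false, List.count_cons_self, pvProduct,
        List.flatMap_assoc, List.map_flatMap, List.flatMap_map, List.map_map]
      refine List.flatMap_congr (fun p _ => ?_)
      refine List.flatMap_congr (fun a _ => ?_)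
      simp [pvFill, Function.comp, List.append_assoc]
    · simp only [pvStep, if_pos h, List.count_cons_of_ne h, List.flatMap_map]
      refine List.flatMap_congr (fun p _ => ?_)
      simp [pvFill, h, List.append_assoc]

theorem gpp_eq (pattern : String) :
    generate_peptide_pattern pattern = generate_peptide_pattern_alt pattern := by
  unfold generate_peptide_pattern generate_peptide_pattern_alt
  rw [pvFold_eq]
  simp

-- ===== VERDICT (by name: the statement is the Claim_ definition above) =====
theorem generate_peptide_pattern_spec : Claim_equal_generate_peptide_pattern := by
  intro pattern _
  exact gpp_eq pattern
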